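-- pv_equiv track=rewrite | github.com/anthonyharrison/CVSS | cvssutils.py | CVSS_modify_base_metrics
-- ===== SOURCE A (Python) =====
-- SEPARATOR = "/"
--
-- def CVSS_modify_base_metrics(mod_string):
--     mod_default = ["X", "X", "X", "X","X", "X", "X", "X"]
--     parameters = {"MAV":0,"MAC":1,"MPR":2, "MUI":3, "MS":4, "MC":5, "MI":6, "MA":7}
--     params = mod_string.split(SEPARATOR)
--     for p in params:
--         s = p.split(":")
--         # s[0] is paramerter name, s[1] is parameter values
--         if s[0] in parameters:
--             # Index = parameters[s[0]]
--             # Update with values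
--             mod_default[parameters[s[0]]] = s[1]
--     return mod_default
-- ===== SOURCE B (Python) =====
-- def CVSS_modify_base_metrics(mod_string):
--     params = mod_string.split("/")
--
--     def lookup(name):
--         # last occurrence wins, so search from the end and stop at the first hit
--         for p in reversed(params):
--             s = p.split(":")
--             if s[0] == name:
--                 return s[1]
--         return "X"
--
--     return [lookup(n) for n in ("MAV", "MAC", "MPR", "MUI", "MS", "MC", "MI", "MA")]
-- ===== Notes on version B (the rewrite author's own statement) =====
-- stated objective: alternative
-- what changed: A makes one input-driven pass mutating a preallocated 8-slot list through a name-to-index dict; B is output-driven: for each of the eight metric names independently it searches the split segments from the end for the last matching name:value pair (early exit on first hit) and defaults to the unset marker, so there is no index map and no mutable result list.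
import Mathlib
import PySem

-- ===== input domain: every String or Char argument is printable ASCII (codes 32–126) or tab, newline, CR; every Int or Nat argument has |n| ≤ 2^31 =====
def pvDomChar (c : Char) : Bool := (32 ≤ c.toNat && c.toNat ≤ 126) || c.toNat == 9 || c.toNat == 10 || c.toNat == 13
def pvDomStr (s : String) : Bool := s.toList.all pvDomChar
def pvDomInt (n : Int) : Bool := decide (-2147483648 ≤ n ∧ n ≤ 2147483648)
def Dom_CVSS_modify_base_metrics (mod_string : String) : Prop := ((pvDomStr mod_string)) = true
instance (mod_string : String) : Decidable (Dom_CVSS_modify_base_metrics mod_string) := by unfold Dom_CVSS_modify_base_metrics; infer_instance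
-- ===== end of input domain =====

-- B replaces A's single mutating pass over the input by an output-driven gather: each of
-- the eight metric names is resolved by an independent reverse search with early exit
-- (objective: alternative, same cost).


-- ===== PORT A =====
-- s = p.split(":")  (split? is none only for an empty separator, never here)
def pvS (p : String) : List String := (PySem.Str.split? p ":").getD []

-- parameters = {"MAV":0,...,"MA":7}
def pvParamsA : PySem.Dict String Int :=
  PySem.Dict.ofList [("MAV",0),("MAC",1),("MPR",2),("MUI",3),("MS",4),("MC",5),("MI",6),("MA",7)]

-- loop body: if s[0] in parameters: mod_default[parameters[s[0]]] = s[1]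
-- (s[1] via pyGet? with a default: Python raises IndexError exactly where pyGet? is none; Pre_ excludes those inputs)
def pvStepA (mod_default : List String) (p : String) : List String :=
  if pvParamsA.contains ((pvS p).getD 0 "") then
    PySem.List.pySetD mod_default (pvParamsA.getD ((pvS p).getD 0 "") 0)
      ((PySem.List.pyGet? (pvS p) 1).getD "")
  else mod_default

def CVSS_modify_base_metrics (mod_string : String) : List String :=
  ((PySem.Str.split? mod_string "/").getD []).foldl pvStepA ["X","X","X","X","X","X","X","X"]

-- ===== PORT B =====
def pvNames : List String := ["MAV","MAC","MPR","MUI","MS","MC","MI","MA"]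

-- s = p.split(":") (B side; split? is none only for an empty separator, never here)
def pvSB (p : String) : List String := (PySem.Str.split? p ":").getD []

-- lookup(name): scan the (already reversed) segment list, return s[1] at the first
-- segment whose s[0] matches, "X" if none matches
def pvLookupB (name : String) : List String → String
  | [] => "X"
  | p :: ps =>
      if (pvSB p).getD 0 "" == name then (PySem.List.pyGet? (pvSB p) 1).getD ""
      else pvLookupB name ps

def CVSS_modify_base_metrics_alt (mod_string : String) : List String :=
  let revParams := ((PySem.Str.split? mod_string "/").getD []).reverse
  pvNames.map (fun n => pvLookupB n revParams)

-- ===== PRECONDITION & SPEC =====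
-- Pre_ excludes exactly the inputs where A raises IndexError: a slash-separated segment that is a bare
-- recognised metric name with no colon-value part, where s[1] does not exist (B raises there too).
def Pre_CVSS_modify_base_metrics (mod_string : String) : Prop :=
  ∀ p ∈ (PySem.Str.split? mod_string "/").getD [], p ∉ pvNames
instance (mod_string : String) : Decidable (Pre_CVSS_modify_base_metrics mod_string) := by
  unfold Pre_CVSS_modify_base_metrics; infer_instance

def pvWitness_CVSS_modify_base_metrics : String := "MAV:N/MC:H/other"

def Spec_CVSS_modify_base_metrics (mod_string : String) (out : List String) : Prop := out = CVSS_modify_base_metrics_alt mod_string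
instance (mod_string : String) (out : List String) : Decidable (Spec_CVSS_modify_base_metrics mod_string out) := by unfold Spec_CVSS_modify_base_metrics; infer_instance

-- ===== CLAIM (what is proved, stated in full; the proofs are below) =====
def Claim_equal_CVSS_modify_base_metrics : Prop := ∀ (mod_string : String), Dom_CVSS_modify_base_metrics mod_string → Pre_CVSS_modify_base_metrics mod_string → Spec_CVSS_modify_base_metrics mod_string (CVSS_modify_base_metrics mod_string)

-- ===== LEMMAS AND PROOFS =====

-- one loop step of A on the gathered list = prepending that segment to every reverse search
lemma pvStep_comm (rest : List String) (p : String) :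
    pvStepA (pvNames.map fun n => pvLookupB n rest) p
      = pvNames.map fun n => pvLookupB n (p :: rest) := by
  unfold pvStepA
  have hL : ∀ n, pvLookupB n (p :: rest)
      = if (pvSB p).getD 0 "" == n then (PySem.List.pyGet? (pvSB p) 1).getD ""
        else pvLookupB n rest := fun n => rfl
  simp only [hL]
  rw [show pvSB p = pvS p from rfl]
  generalize pvS p = s
  generalize (PySem.List.pyGet? s 1).getD "" = v
  generalize hk : s.getD 0 "" = key
  by_cases h : key ∈ pvNames
  · simp only [pvNames, List.mem_cons, List.not_mem_nil, or_false] at h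
    rcases h with rfl | rfl | rfl | rfl | rfl | rfl | rfl | rfl
    · rw [show pvParamsA.contains "MAV" = true from by decide,
          show pvParamsA.getD "MAV" 0 = ((0:Nat):Int) from by decide]
      simp only [pvNames, List.map_cons, List.map_nil]
      rw [PySem.List.pySetD_natCast]
      simp [List.set]
    · rw [show pvParamsA.contains "MAC" = true from by decide,
          show pvParamsA.getD "MAC" 0 = ((1:Nat):Int) from by decide]
      simp only [pvNames, List.map_cons, List.map_nil]
      rw [PySem.List.pySetD_natCast]
      simp [List.set]
    · rw [show pvParamsA.contains "MPR" = true from by decide,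
          show pvParamsA.getD "MPR" 0 = ((2:Nat):Int) from by decide]
      simp only [pvNames, List.map_cons, List.map_nil]
      rw [PySem.List.pySetD_natCast]
      simp [List.set]
    · rw [show pvParamsA.contains "MUI" = true from by decide,
          show pvParamsA.getD "MUI" 0 = ((3:Nat):Int) from by decide]
      simp only [pvNames, List.map_cons, List.map_nil]
      rw [PySem.List.pySetD_natCast]
      simp [List.set]
    · rw [show pvParamsA.contains "MS" = true from by decide,
          show pvParamsA.getD "MS" 0 = ((4:Nat):Int) from by decide]
      simp only [pvNames, List.map_cons, List.map_nil]
      rw [PySem.List.pySetD_natCast]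
      simp [List.set]
    · rw [show pvParamsA.contains "MC" = true from by decide,
          show pvParamsA.getD "MC" 0 = ((5:Nat):Int) from by decide]
      simp only [pvNames, List.map_cons, List.map_nil]
      rw [PySem.List.pySetD_natCast]
      simp [List.set]
    · rw [show pvParamsA.contains "MI" = true from by decide,
          show pvParamsA.getD "MI" 0 = ((6:Nat):Int) from by decide]
      simp only [pvNames, List.map_cons, List.map_nil]
      rw [PySem.List.pySetD_natCast]
      simp [List.set]
    · rw [show pvParamsA.contains "MA" = true from by decide,
          show pvParamsA.getD "MA" 0 = ((7:Nat):Int) from by decide]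
      simp only [pvNames, List.map_cons, List.map_nil]
      rw [PySem.List.pySetD_natCast]
      simp [List.set]
  · have hA : pvParamsA.contains key = false := by
      rw [PySem.Dict.contains_eq_decide_mem_keys, show pvParamsA.keys = pvNames from by decide]
      simpa using h
    have hne : ∀ n ∈ pvNames, (key == n) = false := by
      intro n hn
      simp only [beq_eq_false_iff_ne]; rintro rfl; exact h hn
    rw [hA]
    simp only [Bool.false_eq_true, if_false]
    refine (List.map_congr_left ?_).symm
    intro n hn
    rw [hne n hn]
    simp
lemma pvFold_comm (ps : List String) :
    ps.foldl pvStepA (pvNames.map fun n => pvLookupB n [])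
      = pvNames.map fun n => pvLookupB n ps.reverse := by
  induction ps using List.reverseRecOn with
  | nil => rfl
  | append_singleton ps p ih =>
      rw [List.foldl_append, List.foldl_cons, List.foldl_nil, ih,
        List.reverse_append, List.reverse_singleton, List.singleton_append, pvStep_comm]

-- ===== VERDICT (by name: the statement is the Claim_ definition above) =====
theorem CVSS_modify_base_metrics_spec : Claim_equal_CVSS_modify_base_metrics := by
  intro mod_string _ _
  unfold Spec_CVSS_modify_base_metrics CVSS_modify_base_metrics CVSS_modify_base_metrics_alt
  rw [show (["X","X","X","X","X","X","X","X"] : List String)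
      = pvNames.map fun n => pvLookupB n [] from by decide]
  exact pvFold_comm _
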